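-- pv_equiv track=rewrite | github.com/marcosklein04/PlayTek | backend/wallet/views.py | _pick_relevant_payment
-- ===== SOURCE A (Python) =====
-- def _pick_relevant_payment(results):
--     if not results:
--         return None
--
--     priority = ("approved", "rejected", "cancelled", "expired", "charged_back")
--     for status in priority:
--         payment = next((item for item in results if (item.get("status") or "").lower() == status), None)
--         if payment:
--             return payment
--     return results[0]
-- ===== SOURCE B (Python) =====
-- def _pick_relevant_payment(results):
--     if not results:
--         return None
--     priority = ("approved", "rejected", "cancelled", "expired", "charged_back")
--     best = None
--     best_rank = len(priority)
--     for item in results: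
--         try:
--             rank = priority.index((item.get("status") or "").lower())
--         except ValueError:
--             continue
--         if rank < best_rank:
--             best_rank = rank
--             best = item
--     return best if best is not None else results[0]
-- ===== Notes on version B (the rewrite author's own statement) =====
-- stated objective: alternative
-- what changed: Replaces A's per-status rescans of results (one full scan per priority status) with a single min-by-rank pass: each item's status is mapped to its index in the priority tuple and the first item with the smallest rank is kept; falls back to results[0] if no status is ranked.
import Mathlib
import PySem

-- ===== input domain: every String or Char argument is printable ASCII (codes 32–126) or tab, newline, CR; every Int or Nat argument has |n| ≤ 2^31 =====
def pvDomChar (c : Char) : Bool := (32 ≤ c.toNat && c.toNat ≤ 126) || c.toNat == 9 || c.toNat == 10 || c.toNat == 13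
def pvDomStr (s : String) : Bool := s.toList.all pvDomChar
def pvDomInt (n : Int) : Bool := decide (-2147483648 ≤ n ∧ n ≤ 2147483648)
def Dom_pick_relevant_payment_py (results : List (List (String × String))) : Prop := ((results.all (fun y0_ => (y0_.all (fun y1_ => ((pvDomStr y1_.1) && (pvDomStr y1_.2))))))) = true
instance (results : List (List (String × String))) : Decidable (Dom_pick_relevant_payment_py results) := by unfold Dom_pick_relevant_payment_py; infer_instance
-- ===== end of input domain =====

-- B replaces A's per-status rescans with a single min-by-rank pass (priority.index per item, keep first minimum); same return value on every input.


-- ===== PORT A =====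
-- (item.get("status") or "").lower()
def pvStatusA (item : List (String × String)) : String :=
  PySem.Str.lower (match (PySem.Dict.mk item).get? "status" with
    | none => ""
    | some s => if s = "" then "" else s)

-- the `for status in priority` loop: per status, `next(...)` = first matching item; `if payment:` skips falsy (empty) dicts
def pickLoopA (results : List (List (String × String))) : List String → Option (List (String × String))
  | [] => results.head?       -- return results[0] (results nonempty here)
  | s :: rest =>
    match results.find? (fun item => pvStatusA item == s) with
    | some payment => if payment.isEmpty then pickLoopA results rest else some payment
    | none => pickLoopA results rest

def pick_relevant_payment_py (results : List (List (String × String))) : Option (List (String × String)) :=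
  if results.isEmpty then none
  else pickLoopA results ["approved", "rejected", "cancelled", "expired", "charged_back"]

-- ===== PORT B =====
def pvPriorityB : List String := ["approved", "rejected", "cancelled", "expired", "charged_back"]

-- the single pass: `priority.index(...)` raises ValueError (= index? none) → continue; keep first strict minimum
def pvScanB (results : List (List (String × String))) : Nat × Option (List (String × String)) :=
  results.foldl (fun st item =>
    match PySem.List.index? pvPriorityB
        (PySem.Str.lower (match (PySem.Dict.mk item).get? "status" with
          | none => ""
          | some s => if s = "" then "" else s)) with
    | none => st                 -- except ValueError: continue
    | some rank => if rank < st.1 then (rank, some item) else st)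
    (pvPriorityB.length, none)   -- best_rank = len(priority), best = None

def pick_relevant_payment_py_alt (results : List (List (String × String))) : Option (List (String × String)) :=
  if results.isEmpty then none
  else
    match (pvScanB results).2 with
    | some best => some best               -- return best if best is not None
    | none => results.head?                -- else results[0]

-- ===== PRECONDITION & SPEC =====
def Spec_pick_relevant_payment_py (results : List (List (String × String))) (out : Option (List (String × String))) : Prop := out = pick_relevant_payment_py_alt results
instance (results : List (List (String × String))) (out : Option (List (String × String))) : Decidable (Spec_pick_relevant_payment_py results out) := by unfold Spec_pick_relevant_payment_py; infer_instance

-- ===== CLAIM (what is proved, stated in full; the proofs are below) =====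
def Claim_equal_pick_relevant_payment_py : Prop := ∀ (results : List (List (String × String))), Dom_pick_relevant_payment_py results → Spec_pick_relevant_payment_py results (pick_relevant_payment_py results)

-- ===== LEMMAS AND PROOFS =====

-- proof-side rank of an item: index of its status in the priority list, 5 if absent
def pvRk (item : List (String × String)) : Nat :=
  match PySem.List.index? pvPriorityB (pvStatusA item) with
  | none => 5
  | some r => r

-- proof-side running minimum of the ranks
def pvMinRk : List (List (String × String)) → Nat → Nat
  | [], c => c
  | x :: l, c => pvMinRk l (min (pvRk x) c)

theorem pvMinRk_le (l : List (List (String × String))) (c : Nat) : pvMinRk l c ≤ c := by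
  induction l generalizing c with
  | nil => simp [pvMinRk]
  | cons x l ih =>
    exact le_trans (ih (min (pvRk x) c)) (min_le_right _ _)

theorem pvMinRk_le_rk (l : List (List (String × String))) (c : Nat) (x : List (String × String))
    (hx : x ∈ l) : pvMinRk l c ≤ pvRk x := by
  induction l generalizing c with
  | nil => cases hx
  | cons y l ih =>
    rcases List.mem_cons.mp hx with h | h
    · subst h
      exact le_trans (pvMinRk_le l _) (min_le_left _ _)
    · exact ih _ h

theorem pvRk_le (x : List (String × String)) : pvRk x ≤ 5 := by
  unfold pvRk
  cases h : PySem.List.index? pvPriorityB (pvStatusA x) with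
  | none => exact le_refl 5
  | some r =>
    have := PySem.List.getElem_of_index?_eq_some h
    rcases this with ⟨hk, _⟩
    simp [pvPriorityB] at hk
    show r ≤ 5
    omega

-- B's fold step, rewritten through pvRk (the `none`/ValueError branch is absorbed: pvRk = 5 never beats br ≤ 5)
theorem pvStepB (br : Nat) (b : Option (List (String × String))) (x : List (String × String))
    (hbr : br ≤ 5) :
    (match PySem.List.index? pvPriorityB
        (PySem.Str.lower (match (PySem.Dict.mk x).get? "status" with
          | none => ""
          | some s => if s = "" then "" else s)) with
      | none => ((br, b) : Nat × Option (List (String × String)))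
      | some rank => if rank < br then (rank, some x) else (br, b))
    = if pvRk x < br then (pvRk x, some x) else (br, b) := by
  have hs : (PySem.Str.lower (match (PySem.Dict.mk x).get? "status" with
      | none => ""
      | some s => if s = "" then "" else s)) = pvStatusA x := rfl
  rw [hs]
  unfold pvRk
  cases h : PySem.List.index? pvPriorityB (pvStatusA x) with
  | none =>
    have : ¬ (5 < br) := by omega
    simp [this]
  | some r => rfl

-- the whole fold: the kept item is the FIRST item attaining the minimum rank (when it improves on br)
theorem pvScanB_fold (l : List (List (String × String))) (br : Nat) (b : Option (List (String × String)))
    (hbr : br ≤ 5) :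
    (l.foldl (fun st item =>
      match PySem.List.index? pvPriorityB
          (PySem.Str.lower (match (PySem.Dict.mk item).get? "status" with
            | none => ""
            | some s => if s = "" then "" else s)) with
      | none => st
      | some rank => if rank < st.1 then (rank, some item) else st) (br, b)).2
    = if pvMinRk l br < br then l.find? (fun x => pvRk x == pvMinRk l br) else b := by
  induction l generalizing br b with
  | nil => simp [pvMinRk]
  | cons x l ih =>
    rw [List.foldl_cons]
    have hstep := pvStepB br b x hbr
    simp only at hstep
    rw [hstep]
    by_cases h : pvRk x < br
    · rw [if_pos h]
      have hx5 : pvRk x ≤ 5 := pvRk_le x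
      rw [ih (pvRk x) (some x) hx5]
      have hmin : min (pvRk x) br = pvRk x := by omega
      have hM : pvMinRk (x :: l) br = pvMinRk l (pvRk x) := by
        simp [pvMinRk, hmin]
      have hle : pvMinRk l (pvRk x) ≤ pvRk x := pvMinRk_le l _
      rw [hM]
      by_cases h2 : pvMinRk l (pvRk x) < pvRk x
      · rw [if_pos h2, if_pos (by omega)]
        rw [List.find?_cons_of_neg]
        simp
        omega
      · rw [if_neg h2]
        have heq : pvMinRk l (pvRk x) = pvRk x := by omega
        rw [if_pos (by omega)]
        rw [List.find?_cons_of_pos]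
        simp [heq]
    · rw [if_neg h]
      have hmin : min (pvRk x) br = br := by omega
      have hM : pvMinRk (x :: l) br = pvMinRk l br := by
        simp [pvMinRk, hmin]
      rw [ih br b hbr, hM]
      by_cases h2 : pvMinRk l br < br
      · rw [if_pos h2, if_pos h2]
        rw [List.find?_cons_of_neg]
        simp
        omega
      · rw [if_neg h2, if_neg h2]

-- A's loop: one skipped step / one returning step
theorem loopA_none (results : List (List (String × String))) (s : String) (rest : List String)
    (h : results.find? (fun item => pvStatusA item == s) = none) :
    pickLoopA results (s :: rest) = pickLoopA results rest := by
  simp [pickLoopA, h]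

theorem loopA_some (results : List (List (String × String))) (s : String) (rest : List String)
    (p : List (String × String))
    (h : results.find? (fun item => pvStatusA item == s) = some p) (hp : p.isEmpty = false) :
    pickLoopA results (s :: rest) = some p := by
  simp [pickLoopA, h, hp]

-- matching A's status test against B's rank test, for a status s of rank j
theorem pred_eq (j : Nat) (s : String) (hs : PySem.List.index? pvPriorityB s = some j)
    (x : List (String × String)) : (pvStatusA x == s) = (pvRk x == j) := by
  rcases PySem.List.getElem_of_index?_eq_some hs with ⟨hj, hsj, _⟩
  by_cases h : pvStatusA x = s
  · have : pvRk x = j := by unfold pvRk; rw [h, hs]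
    simp [h, this]
  · have hne : pvRk x ≠ j := by
      intro hrk
      unfold pvRk at hrk
      cases hidx : PySem.List.index? pvPriorityB (pvStatusA x) with
      | none =>
        rw [hidx] at hrk
        have hrk5 : (5 : Nat) = j := hrk
        have : j < 5 := by simpa [pvPriorityB] using hj
        omega
      | some r =>
        rw [hidx] at hrk
        simp at hrk
        subst hrk
        rcases PySem.List.getElem_of_index?_eq_some hidx with ⟨hj2, hxj, _⟩
        exact h (by rw [← hxj, hsj])
    simp [h, hne]

theorem find_bridge (results : List (List (String × String))) (j : Nat) (s : String)
    (hs : PySem.List.index? pvPriorityB s = some j) :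
    results.find? (fun item => pvStatusA item == s) = results.find? (fun x => pvRk x == j) := by
  exact congrArg results.find? (funext (pred_eq j s hs))

-- below the minimum there is no item
theorem find_none_of_lt (results : List (List (String × String))) (j : Nat)
    (hj : j < pvMinRk results 5) :
    results.find? (fun x => pvRk x == j) = none := by
  rw [List.find?_eq_none]
  intro x hx
  have := pvMinRk_le_rk results 5 x hx
  simp
  omega

-- the minimum is attained
theorem pvMinRk_attained (l : List (List (String × String))) (c : Nat)
    (h : pvMinRk l c < c) : ∃ x ∈ l, pvRk x = pvMinRk l c := by
  induction l generalizing c with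
  | nil => simp [pvMinRk] at h
  | cons x l ih =>
    simp only [pvMinRk] at h ⊢
    by_cases h2 : pvMinRk l (min (pvRk x) c) < min (pvRk x) c
    · rcases ih _ h2 with ⟨y, hy, hry⟩
      exact ⟨y, List.mem_cons_of_mem _ hy, hry⟩
    · have hle := pvMinRk_le l (min (pvRk x) c)
      have heq : pvMinRk l (min (pvRk x) c) = min (pvRk x) c := by omega
      have hxc : pvRk x < c := by omega
      have : min (pvRk x) c = pvRk x := by omega
      exact ⟨x, List.mem_cons_self .., by omega⟩

-- a matched item has a nonempty (truthy) status, hence is not the empty dict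
theorem not_isEmpty_of_rk (p : List (String × String)) (j : Nat) (hj : j < 5)
    (h : pvRk p = j) : p.isEmpty = false := by
  cases p with
  | nil =>
    have : pvRk [] = 5 := by decide
    omega
  | cons a l => rfl

-- ===== VERDICT (by name: the statement is the Claim_ definition above) =====
theorem pick_relevant_payment_py_spec : Claim_equal_pick_relevant_payment_py := by
  intro results _
  unfold Spec_pick_relevant_payment_py pick_relevant_payment_py pick_relevant_payment_py_alt
  by_cases hemp : results.isEmpty
  · simp [hemp]
  · rw [if_neg hemp, if_neg hemp]
    have hscan : (pvScanB results).2
        = if pvMinRk results 5 < 5 then results.find? (fun x => pvRk x == pvMinRk results 5)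
          else none := by
      unfold pvScanB
      exact pvScanB_fold results 5 none (le_refl 5)
    have hm5 : pvMinRk results 5 ≤ 5 := pvMinRk_le results 5
    set m := pvMinRk results 5 with hm
    have e0 := find_bridge results 0 "approved" (by decide)
    have e1 := find_bridge results 1 "rejected" (by decide)
    have e2 := find_bridge results 2 "cancelled" (by decide)
    have e3 := find_bridge results 3 "expired" (by decide)
    have e4 := find_bridge results 4 "charged_back" (by decide)
    by_cases hlt : m < 5
    · rcases pvMinRk_attained results 5 (by omega) with ⟨y, hy, hry⟩
      rw [← hm] at hry
      have hfind : (results.find? (fun x => pvRk x == m)).isSome := by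
        rw [List.find?_isSome]
        exact ⟨y, hy, by simp [hry]⟩
      rcases Option.isSome_iff_exists.mp hfind with ⟨p, hp⟩
      have hrp : pvRk p = m := by
        have := List.find?_some hp
        simpa using this
      have hpne : p.isEmpty = false := not_isEmpty_of_rk p m hlt hrp
      rw [hscan, if_pos hlt, hp]
      interval_cases m
      · exact loopA_some _ _ _ p (by rw [e0]; exact hp) hpne
      · rw [loopA_none _ _ _ (by rw [e0]; exact find_none_of_lt results 0 (by omega))]
        exact loopA_some _ _ _ p (by rw [e1]; exact hp) hpne
      · rw [loopA_none _ _ _ (by rw [e0]; exact find_none_of_lt results 0 (by omega)),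
            loopA_none _ _ _ (by rw [e1]; exact find_none_of_lt results 1 (by omega))]
        exact loopA_some _ _ _ p (by rw [e2]; exact hp) hpne
      · rw [loopA_none _ _ _ (by rw [e0]; exact find_none_of_lt results 0 (by omega)),
            loopA_none _ _ _ (by rw [e1]; exact find_none_of_lt results 1 (by omega)),
            loopA_none _ _ _ (by rw [e2]; exact find_none_of_lt results 2 (by omega))]
        exact loopA_some _ _ _ p (by rw [e3]; exact hp) hpne
      · rw [loopA_none _ _ _ (by rw [e0]; exact find_none_of_lt results 0 (by omega)),
            loopA_none _ _ _ (by rw [e1]; exact find_none_of_lt results 1 (by omega)),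
            loopA_none _ _ _ (by rw [e2]; exact find_none_of_lt results 2 (by omega)),
            loopA_none _ _ _ (by rw [e3]; exact find_none_of_lt results 3 (by omega))]
        exact loopA_some _ _ _ p (by rw [e4]; exact hp) hpne
    · have hm5' : m = 5 := by omega
      rw [hscan, if_neg hlt]
      rw [loopA_none _ _ _ (by rw [e0]; exact find_none_of_lt results 0 (by omega)),
          loopA_none _ _ _ (by rw [e1]; exact find_none_of_lt results 1 (by omega)),
          loopA_none _ _ _ (by rw [e2]; exact find_none_of_lt results 2 (by omega)),
          loopA_none _ _ _ (by rw [e3]; exact find_none_of_lt results 3 (by omega)),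
          loopA_none _ _ _ (by rw [e4]; exact find_none_of_lt results 4 (by omega))]
      rfl
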